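-- pv_equiv track=rewrite | github.com/petrumat/CS50p | Problem_Set_2/plates.py | no_punctuation
-- ===== SOURCE A (Python) =====
-- import string
--
-- def no_punctuation(s):
--     # Define all possible punctuation chars
--     punctuations = list(string.punctuation)
--     punctuations.append(" ")
--
--     # Determine if plate has punctuation
--     has_punctuation = False
--     for char in s:
--         if char in punctuations:
--             # Find first punctuation and break loop to save runtime
--             has_punctuation = True
--             break
--
--     return not has_punctuation
-- ===== SOURCE B (Python) =====
-- import string
--
-- def no_punctuation(s):
--     # Delete every forbidden character via a translation table, then
--     # compare lengths: nothing was deleted iff s had no punctuation/space.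
--     table = str.maketrans("", "", string.punctuation + " ")
--     return len(s.translate(table)) == len(s)
-- ===== Notes on version B (the rewrite author's own statement) =====
-- stated objective: idiomatic
-- what changed: Instead of scanning with a flag and early break against a 33-element list, B builds a translation table that deletes all forbidden characters, applies str.translate, and declares the string clean iff its length is unchanged (delete-and-compare-length instead of search-for-first-hit).
import Mathlib
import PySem

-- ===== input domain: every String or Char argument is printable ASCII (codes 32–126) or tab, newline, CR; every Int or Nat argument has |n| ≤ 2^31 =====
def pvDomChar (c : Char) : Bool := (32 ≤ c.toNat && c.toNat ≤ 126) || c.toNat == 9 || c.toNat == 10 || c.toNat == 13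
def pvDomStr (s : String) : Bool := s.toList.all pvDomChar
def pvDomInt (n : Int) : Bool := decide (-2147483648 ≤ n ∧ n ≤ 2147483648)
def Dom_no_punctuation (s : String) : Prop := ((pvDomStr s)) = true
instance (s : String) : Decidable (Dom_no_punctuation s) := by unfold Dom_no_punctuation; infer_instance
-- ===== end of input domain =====

-- B replaces A's flag-and-break scan with delete-forbidden-chars-and-compare-lengths (idiomatic, same behaviour).

-- ===== PORT A =====
-- string.punctuation as a list, with " " appended (A's `punctuations`)
def pvPunctuationsA : List Char :=
  "!\"#$%&'()*+,-./:;<=>?@[\\]^_`{|}~".toList ++ [' ']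

-- the for-loop with the early break: returns the final `has_punctuation`
def pvScanA : List Char → Bool
  | [] => false
  | c :: rest => if pvPunctuationsA.contains c then true else pvScanA rest

def no_punctuation (s : String) : Bool :=
  !(pvScanA s.toList)

-- ===== PORT B =====
-- the deletion table: the set of characters str.maketrans("", "", punctuation + " ") deletes
def pvDeleteTableB : List Char :=
  "!\"#$%&'()*+,-./:;<=>?@[\\]^_`{|}~ ".toList

-- s.translate(table): keep exactly the characters not in the deletion table
def pvTranslateB (l : List Char) : List Char :=
  l.filter (fun c => !(pvDeleteTableB.contains c))

def no_punctuation_alt (s : String) : Bool :=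
  (pvTranslateB s.toList).length == s.toList.length

-- ===== PRECONDITION & SPEC =====
def Spec_no_punctuation (s : String) (out : Bool) : Prop := out = no_punctuation_alt s
instance (s : String) (out : Bool) : Decidable (Spec_no_punctuation s out) := by unfold Spec_no_punctuation; infer_instance

-- ===== CLAIM (what is proved, stated in full; the proofs are below) =====
def Claim_equal_no_punctuation : Prop := ∀ (s : String), Dom_no_punctuation s → Spec_no_punctuation s (no_punctuation s)

-- ===== LEMMAS AND PROOFS =====
lemma pvTable_eq : pvDeleteTableB = pvPunctuationsA := by decide

lemma pvScan_filter (l : List Char) :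
    (!(pvScanA l)) = ((l.filter (fun c => !(pvPunctuationsA.contains c))).length == l.length) := by
  induction l with
  | nil => rfl
  | cons c rest ih =>
    have hle := List.length_filter_le (fun c => !(pvPunctuationsA.contains c)) rest
    simp only [pvScanA, List.filter_cons]
    by_cases h : pvPunctuationsA.contains c = true
    · simp only [h, if_true, Bool.not_true, Bool.false_eq_true, if_false, List.length_cons]
      rw [Bool.eq_iff_iff]
      simp only [Bool.not_true, Bool.false_eq_true, beq_iff_eq, false_iff]
      omega
    · simp only [h, Bool.false_eq_true, if_false, eq_false_of_ne_true h, Bool.not_false,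
        if_true, ih, List.length_cons]
      rw [Bool.eq_iff_iff]
      simp only [beq_iff_eq]
      omega

-- ===== VERDICT (by name: the statement is the Claim_ definition above) =====
theorem no_punctuation_spec : Claim_equal_no_punctuation := by
  intro s _
  unfold Spec_no_punctuation no_punctuation no_punctuation_alt pvTranslateB
  rw [pvTable_eq, pvScan_filter]
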